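-- pv_equiv track=rewrite | github.com/parkbum11/Algorithm | Programmers/자물쇠와열쇠.py | solution
-- ===== SOURCE A (Python) =====
-- def solution(key, lock):
--     length = len(lock) + (len(key) - 1) * 2
--     arr = [[0] * length for _ in range(length)]
--
--     # 가운데 배치
--     for i in range(len(lock)):
--         for j in range(len(lock)):
--             arr[i + (len(key) - 1)][j + (len(key) - 1)] = lock[i][j]
--
--     # 미리 돌려 놓기
--     new_key = [[[] * len(key) for _ in range(len(key))] for _ in range(len(key))]
--     for _ in range(4):
--         key = list(zip(*key[::-1]))
--         for i in range(len(key)):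
--             for j in range(len(key)):
--                 new_key[i][j].append(key[i][j])
--
--     # 열쇠 끼고 빼기 및 확인
--     for i in range((len(key) - 1) + len(lock)):
--         for j in range((len(key) - 1) + len(lock)):
--             for k in range(4):
--                 # 끼기
--                 for ii in range(len(key)):
--                     for jj in range(len(key)):
--                         arr[i + ii][j + jj] += new_key[ii][jj][k]
--                 # 확인
--                 check = True
--                 for r in range((len(key) - 1), (len(key) - 1) + len(lock)):
--                     for c in range((len(key) - 1), (len(key) - 1) + len(lock)):
--                         if arr[r][c] != 1:
--                             check = False
--                             break
--                     if check == False: break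
--                 if check == True:
--                     return True
--                 # 빼기
--                 for ii in range(len(key)):
--                     for jj in range(len(key)):
--                         arr[i + ii][j + jj] -= new_key[ii][jj][k]
--     return False
-- ===== SOURCE B (Python) =====
-- def solution(key, lock):
--     # Direct overlap test: no padded board, no precomputed rotation table,
--     # no insert/check/remove mutation. For each rotation and shift, check every
--     # lock cell against the overlapping key cell (if any) with early exit.
--     n, m = len(key), len(lock)
--     for _ in range(4):
--         key = [list(row) for row in zip(*key[::-1])]
--         for dx in range(n - 1 + m):
--             for dy in range(n - 1 + m):
--                 if all(lock[r][c] + (key[r + (n - 1) - dx][c + (n - 1) - dy]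
--                        if dx <= r + (n - 1) < dx + n and dy <= c + (n - 1) < dy + n else 0) == 1
--                        for r in range(m) for c in range(m)):
--                     return True
--     return False
-- ===== Notes on version B (the rewrite author's own statement) =====
-- stated objective: faster
-- what changed: B drops A's padded board, precomputed rotation table and insert/check/remove mutation: for each rotation and shift it tests every lock cell directly against the overlapping key cell with an early-exiting all().
-- outside the precondition, e.g. on solution([], []): A returns False, B returns False; on solution([[], [1, 1]], [[1, 0], [0, 1]]): A returns False, B raises IndexError
import Mathlib
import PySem

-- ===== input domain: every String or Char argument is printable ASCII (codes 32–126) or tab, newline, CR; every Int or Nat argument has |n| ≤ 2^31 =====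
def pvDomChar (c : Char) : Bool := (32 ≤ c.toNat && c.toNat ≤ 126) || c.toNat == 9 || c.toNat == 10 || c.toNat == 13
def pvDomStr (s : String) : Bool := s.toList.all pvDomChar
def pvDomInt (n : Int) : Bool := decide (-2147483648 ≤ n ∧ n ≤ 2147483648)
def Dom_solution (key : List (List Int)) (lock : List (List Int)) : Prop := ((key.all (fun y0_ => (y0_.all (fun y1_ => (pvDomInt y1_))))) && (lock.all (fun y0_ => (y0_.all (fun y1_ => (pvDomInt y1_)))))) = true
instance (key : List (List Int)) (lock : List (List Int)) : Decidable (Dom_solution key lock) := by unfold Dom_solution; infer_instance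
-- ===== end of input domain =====

-- B replaces A's padded board + precomputed rotation table + insert/check/remove
-- mutation by a direct per-placement overlap test over the lock cells (objective:
-- faster in a timing run; no board is built or mutated).

-- ===== PORT A =====
-- shared low-level helpers (both Pythons use `arr[r][c]`-style reads and the
-- same rotation line `zip(*key[::-1])`)
-- `b[r][c]` read; in both ports every read is in range under Pre_, so getD 0 is exact
def pvGet2 (b : List (List Int)) (r c : Nat) : Int := (b.getD r []).getD c 0
-- Python `zip(*rows)`: min row length many tuples (exact; `none`/empty handled like zip())
def pvZipStar (rows : List (List Int)) : List (List Int) :=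
  match (rows.map List.length).min? with
  | none => []
  | some k => (List.range k).map (fun j => rows.map (fun row => row.getD j 0))
-- `list(zip(*key[::-1]))`, the 90° rotation both Pythons perform
def pvRot (k : List (List Int)) : List (List Int) := pvZipStar k.reverse
-- `arr[r][c] = g(arr[r][c])` (in-place cell update; out of range = no-op, never hit under Pre_)
def pvUpd2 (r c : Nat) (g : Int → Int) (b : List (List Int)) : List (List Int) :=
  b.modify r (fun row => row.modify c g)
-- the index pairs of a nested `for i in range(a): for j in range(b):` loop
def pvPairs (a b : Nat) : List (Nat × Nat) := (List.range a).flatMap (fun i => (List.range b).map (fun j => (i, j)))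
-- `new_key[i][j][k]`
def pvGet3 (nk : List (List (List Int))) (i j k : Nat) : Int := ((nk.getD i []).getD j []).getD k 0

-- A's "미리 돌려 놓기": 4 times rotate, then append key'[i][j] to every cell of new_key
-- (the full-grid double loop is written as mapIdx over the same cells)
def pvBuildRots : Nat → List (List Int) → List (List (List Int)) → List (List Int) × List (List (List Int))
  | 0, k, nk => (k, nk)
  | t+1, k, nk =>
      let k' := pvRot k
      pvBuildRots t k' (nk.mapIdx (fun i row => row.mapIdx (fun j l => l ++ [pvGet2 k' i j])))

-- A's "끼기": arr[i+ii][j+jj] += new_key[ii][jj][k]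
def pvAddK (nk : List (List (List Int))) (nf i j k : Nat) (arr : List (List Int)) : List (List Int) :=
  (pvPairs nf nf).foldl (fun b p => pvUpd2 (i + p.1) (j + p.2) (fun x => x + pvGet3 nk p.1 p.2 k) b) arr
-- A's "빼기": arr[i+ii][j+jj] -= new_key[ii][jj][k]
def pvSubK (nk : List (List (List Int))) (nf i j k : Nat) (arr : List (List Int)) : List (List Int) :=
  (pvPairs nf nf).foldl (fun b p => pvUpd2 (i + p.1) (j + p.2) (fun x => x - pvGet3 nk p.1 p.2 k) b) arr
-- A's "확인" loop with break ≡ all cells of the lock region equal 1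
-- (Python's `range(nf-1, nf-1+m)` written as offset over `range m`)
def pvCheck (nf m : Nat) (arr : List (List Int)) : Bool :=
  (List.range m).all (fun r => (List.range m).all (fun c => pvGet2 arr (r + (nf - 1)) (c + (nf - 1)) == 1))

-- the `for k in range(4)` loop with its early `return True`, threading arr
def pvLoopK (nk : List (List (List Int))) (nf m i j : Nat) : List Nat → List (List Int) → Bool × List (List Int)
  | [], arr => (false, arr)
  | k :: ks, arr =>
      let arr1 := pvAddK nk nf i j k arr
      if pvCheck nf m arr1 then (true, arr1)
      else pvLoopK nk nf m i j ks (pvSubK nk nf i j k arr1)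

-- the `for i: for j:` loop, threading arr
def pvLoopIJ (nk : List (List (List Int))) (nf m : Nat) : List (Nat × Nat) → List (List Int) → Bool
  | [], _ => false
  | p :: ps, arr =>
      match pvLoopK nk nf m p.1 p.2 (List.range 4) arr with
      | (true, _) => true
      | (false, arr') => pvLoopIJ nk nf m ps arr'

def solution (key : List (List Int)) (lock : List (List Int)) : Bool :=
  let n := key.length
  let m := lock.length
  let L := m + (n - 1) * 2
  let arr0 := List.replicate L (List.replicate L (0 : Int))
  -- 가운데 배치: arr[i+(n-1)][j+(n-1)] = lock[i][j]
  let base := (pvPairs m m).foldl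
    (fun b p => pvUpd2 (p.1 + (n - 1)) (p.2 + (n - 1)) (fun _ => pvGet2 lock p.1 p.2) b) arr0
  let nk0 := List.replicate n (List.replicate n ([] : List Int))
  match pvBuildRots 4 key nk0 with
  | (key4, nk) =>
      -- after the prebuild loop `key` is the 4-times-rotated key; A keeps using len(key)
      pvLoopIJ nk key4.length m (pvPairs ((key4.length - 1) + m) ((key4.length - 1) + m)) base

-- ===== PORT B =====
-- `all(lock[r][c] + (key[...] if window else 0) == 1 for r in range(m) for c in range(m))`
def pvFits (cur lock : List (List Int)) (n m dx dy : Nat) : Bool :=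
  (List.range m).all (fun r => (List.range m).all (fun c =>
    pvGet2 lock r c +
      (if dx ≤ r + (n - 1) ∧ r + (n - 1) < dx + n ∧ dy ≤ c + (n - 1) ∧ c + (n - 1) < dy + n
       then pvGet2 cur (r + (n - 1) - dx) (c + (n - 1) - dy) else 0) == 1))

-- B's `for _ in range(4):` rotate-then-scan loop with early return
def pvRotLoop (lock : List (List Int)) (n m : Nat) : Nat → List (List Int) → Bool
  | 0, _ => false
  | t+1, cur =>
      let cur' := pvRot cur
      if (List.range ((n - 1) + m)).any (fun dx =>
           (List.range ((n - 1) + m)).any (fun dy => pvFits cur' lock n m dx dy))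
      then true
      else pvRotLoop lock n m t cur'

def solution_alt (key : List (List Int)) (lock : List (List Int)) : Bool :=
  pvRotLoop lock key.length lock.length 4 key

-- ===== PRECONDITION & SPEC =====
-- Pre_ restricts to the problem's natural domain: a non-empty key whose shortest row
-- has exactly len(key) entries (so zip-rotation keeps it len(key)×len(key)) and a lock
-- whose rows all have at least len(lock) entries.  Outside it A either raises
-- (IndexError from ragged rows / negative padding) or returns values produced by
-- accidental raggedness effects (the rotation collapsing the key, negative-index
-- wraparound into the padded board), which B does not reproduce.
def Pre_solution (key : List (List Int)) (lock : List (List Int)) : Prop :=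
  1 ≤ key.length ∧ (key.map List.length).min? = some key.length ∧
    ∀ row ∈ lock, lock.length ≤ row.length
instance (key : List (List Int)) (lock : List (List Int)) : Decidable (Pre_solution key lock) := by
  unfold Pre_solution; infer_instance

def pvWitness_solution : List (List Int) × List (List Int) :=
  ([[1, 0], [0, 0]], [[0, 1], [1, 1]])

def Spec_solution (key : List (List Int)) (lock : List (List Int)) (out : Bool) : Prop := out = solution_alt key lock
instance (key : List (List Int)) (lock : List (List Int)) (out : Bool) : Decidable (Spec_solution key lock out) := by unfold Spec_solution; infer_instance

-- ===== CLAIM (what is proved, stated in full; the proofs are below) =====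
def Claim_equal_solution : Prop := ∀ (key : List (List Int)) (lock : List (List Int)), Dom_solution key lock → Pre_solution key lock → Spec_solution key lock (solution key lock)

-- ===== LEMMAS AND PROOFS =====

def SqG (b : List (List Int)) (h w : Nat) : Prop := b.length = h ∧ ∀ i, i < h → (b.getD i []).length = w

theorem getD_modify_int (row : List Int) (c j : Nat) (g : Int → Int) :
    (row.modify c g).getD j 0 = if c = j ∧ j < row.length then g (row.getD j 0) else row.getD j 0 := by
  rcases h : row[j]? with _ | x
  · have hj : ¬ j < row.length := by simpa [List.getElem?_eq_none_iff] using h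
    simp [List.getD_eq_getElem?_getD, h, hj]
  · have hj : j < row.length := (List.getElem?_eq_some_iff.mp h).1
    simp only [List.getD_eq_getElem?_getD, List.getElem?_modify, h, Option.map_some, Option.getD_some]
    split_ifs <;> simp_all

theorem getD_row_upd2 (r c : Nat) (g : Int → Int) (b : List (List Int)) (i : Nat) :
    (pvUpd2 r c g b).getD i [] = if r = i then (b.getD i []).modify c g else b.getD i [] := by
  rcases h : b[i]? with _ | row
  · simp only [pvUpd2, List.getD_eq_getElem?_getD, List.getElem?_modify, h, Option.map_none, Option.getD_none]
    split_ifs <;> simp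
  · simp only [pvUpd2, List.getD_eq_getElem?_getD, List.getElem?_modify, h, Option.map_some, Option.getD_some]
    split_ifs <;> simp

theorem get2_upd2 (r c : Nat) (g : Int → Int) (b : List (List Int)) (i j : Nat) :
    pvGet2 (pvUpd2 r c g b) i j
      = if r = i ∧ c = j ∧ j < (b.getD i []).length then g (pvGet2 b i j) else pvGet2 b i j := by
  unfold pvGet2
  rw [getD_row_upd2]
  by_cases hr : r = i
  · simp only [hr, if_true, getD_modify_int]
    split_ifs with h1 h2 h2 <;> simp_all <;> omega
  · simp [hr]

theorem SqG_upd2 (r c : Nat) (g : Int → Int) (b : List (List Int)) (h w : Nat)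
    (hs : SqG b h w) : SqG (pvUpd2 r c g b) h w := by
  obtain ⟨hl, hrow⟩ := hs
  refine ⟨by simpa [pvUpd2, List.length_modify] using hl, fun i hi => ?_⟩
  rw [getD_row_upd2]
  have hw := hrow i hi
  rw [List.getD_eq_getElem?_getD] at hw ⊢
  split_ifs <;> simp [List.length_modify, hw]

theorem SqG_foldl_upd2 (ρ γ : Nat × Nat → Nat) (g : Nat × Nat → Int → Int)
    (cs : List (Nat × Nat)) (b : List (List Int)) (h w : Nat) (hs : SqG b h w) :
    SqG (cs.foldl (fun b p => pvUpd2 (ρ p) (γ p) (g p) b) b) h w := by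
  induction cs generalizing b with
  | nil => exact hs
  | cons q cs ih => exact ih _ (SqG_upd2 _ _ _ _ _ _ hs)

theorem get2_foldl_none (ρ γ : Nat × Nat → Nat) (g : Nat × Nat → Int → Int)
    (cs : List (Nat × Nat)) (b : List (List Int)) (r c : Nat)
    (hn : ∀ p ∈ cs, ¬(ρ p = r ∧ γ p = c)) :
    pvGet2 (cs.foldl (fun b p => pvUpd2 (ρ p) (γ p) (g p) b) b) r c = pvGet2 b r c := by
  induction cs generalizing b with
  | nil => rfl
  | cons q cs ih =>
    rw [List.foldl_cons, ih _ (fun p hp => hn p (List.mem_cons_of_mem _ hp)), get2_upd2]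
    have := hn q (List.mem_cons_self ..)
    split_ifs with h1
    · exact absurd ⟨h1.1, h1.2.1⟩ this
    · rfl

theorem get2_foldl_once (ρ γ : Nat × Nat → Nat) (g : Nat × Nat → Int → Int)
    (cs : List (Nat × Nat)) (b : List (List Int)) (h w r c : Nat) (p₀ : Nat × Nat)
    (hnd : (cs.map (fun p => (ρ p, γ p))).Nodup)
    (hmem : p₀ ∈ cs) (hρ : ρ p₀ = r) (hγ : γ p₀ = c)
    (hs : SqG b h w) (hr : r < h) (hc : c < w) :
    pvGet2 (cs.foldl (fun b p => pvUpd2 (ρ p) (γ p) (g p) b) b) r c = g p₀ (pvGet2 b r c) := by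
  induction cs generalizing b with
  | nil => cases hmem
  | cons q cs ih =>
    rw [List.map_cons, List.nodup_cons] at hnd
    rw [List.foldl_cons]
    by_cases hq : ρ q = r ∧ γ q = c
    · have hnot : ∀ p ∈ cs, ¬(ρ p = r ∧ γ p = c) := by
        intro p hp hpc
        exact hnd.1 (by
          rw [hq.1, hq.2, ← hpc.1, ← hpc.2]
          exact List.mem_map_of_mem hp)
      have hp₀q : p₀ = q := by
        rcases List.mem_cons.mp hmem with h' | h'
        · exact h'
        · exact absurd ⟨hρ, hγ⟩ (hnot _ h')
      rw [get2_foldl_none _ _ _ _ _ _ _ hnot, get2_upd2]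
      have hlen : c < (b.getD r []).length := by rw [hs.2 r hr]; exact hc
      rw [if_pos ⟨hq.1, hq.2, hlen⟩, hp₀q]
    · have hp₀ : p₀ ∈ cs := by
        rcases List.mem_cons.mp hmem with h' | h'
        · exact absurd ⟨h' ▸ hρ, h' ▸ hγ⟩ hq
        · exact h'
      rw [ih (hnd := hnd.2) (hmem := hp₀) (hs := SqG_upd2 _ _ _ _ _ _ hs)]
      rw [get2_upd2, if_neg (by intro hx; exact hq ⟨hx.1, hx.2.1⟩)]

theorem mem_pvPairs (a b : Nat) (p : Nat × Nat) : p ∈ pvPairs a b ↔ p.1 < a ∧ p.2 < b := by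
  cases p with
  | mk i j => simp [pvPairs]

theorem nodup_pvPairs (a b : Nat) : (pvPairs a b).Nodup := by
  have : pvPairs a b = (List.range a) ×ˢ (List.range b) := rfl
  rw [this]
  exact List.Nodup.product List.nodup_range List.nodup_range

theorem SqG_zeroGrid (L : Nat) : SqG (List.replicate L (List.replicate L (0 : Int))) L L := by
  refine ⟨List.length_replicate, fun i hi => ?_⟩
  rw [List.getD_eq_getElem _ _ (by simpa using hi)]
  simp

theorem grid_ext (a b : List (List Int)) (h w : Nat)
    (ha : SqG a h w) (hb : SqG b h w)
    (he : ∀ r c, r < h → c < w → pvGet2 a r c = pvGet2 b r c) : a = b := by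
  apply List.ext_getElem (by rw [ha.1, hb.1])
  intro i h1 h2
  have hih : i < h := ha.1 ▸ h1
  have l1 := ha.2 i hih
  have l2 := hb.2 i hih
  rw [List.getD_eq_getElem _ _ h1] at l1
  rw [List.getD_eq_getElem _ _ h2] at l2
  apply List.ext_getElem (by rw [l1, l2])
  intro c hc1 hc2
  have hcw : c < w := l1 ▸ hc1
  have he2 := he i c hih hcw
  unfold pvGet2 at he2
  rw [List.getD_eq_getElem _ _ h1, List.getD_eq_getElem _ _ h2] at he2
  rw [List.getD_eq_getElem _ _ hc1, List.getD_eq_getElem _ _ hc2] at he2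
  exact he2



theorem keymap_nodup (nf i j : Nat) :
    ((pvPairs nf nf).map (fun p => (i + p.1, j + p.2))).Nodup := by
  refine List.Nodup.map ?_ (nodup_pvPairs nf nf)
  intro p q hpq
  cases p; cases q
  simp only [Prod.mk.injEq] at hpq ⊢
  omega

theorem sub_add_cancel_grid (nk : List (List (List Int))) (nf i j k L : Nat)
    (arr : List (List Int)) (hs : SqG arr L L)
    (hin : ∀ p ∈ pvPairs nf nf, i + p.1 < L ∧ j + p.2 < L) :
    pvSubK nk nf i j k (pvAddK nk nf i j k arr) = arr := by
  unfold pvSubK pvAddK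
  apply grid_ext _ _ L L
    (SqG_foldl_upd2 _ _ _ _ _ _ _ (SqG_foldl_upd2 _ _ _ _ _ _ _ hs)) hs
  intro r c hr hc
  by_cases hp : ∃ p ∈ pvPairs nf nf, i + p.1 = r ∧ j + p.2 = c
  · obtain ⟨p₀, hp₀, h1, h2⟩ := hp
    rw [get2_foldl_once (fun p => i + p.1) (fun p => j + p.2) _ _ _ L L _ _ p₀
          (keymap_nodup nf i j) hp₀ h1 h2 (SqG_foldl_upd2 _ _ _ _ _ _ _ hs) hr hc,
        get2_foldl_once (fun p => i + p.1) (fun p => j + p.2) _ _ _ L L _ _ p₀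
          (keymap_nodup nf i j) hp₀ h1 h2 hs hr hc]
    ring
  · push_neg at hp
    rw [get2_foldl_none _ _ _ _ _ _ _ (fun p hmem hc' => (hp p hmem hc'.1 hc'.2).elim),
        get2_foldl_none _ _ _ _ _ _ _ (fun p hmem hc' => (hp p hmem hc'.1 hc'.2).elim)]

theorem pvLoopK_spec (nk : List (List (List Int))) (nf m i j : Nat)
    (arr : List (List Int))
    (hc : ∀ k, pvSubK nk nf i j k (pvAddK nk nf i j k arr) = arr)
    (ks : List Nat) :
    (pvLoopK nk nf m i j ks arr).1 = ks.any (fun k => pvCheck nf m (pvAddK nk nf i j k arr))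
      ∧ (ks.any (fun k => pvCheck nf m (pvAddK nk nf i j k arr)) = false →
          pvLoopK nk nf m i j ks arr = (false, arr)) := by
  induction ks with
  | nil => exact ⟨rfl, fun _ => rfl⟩
  | cons k ks ih =>
    simp only [pvLoopK, List.any_cons]
    by_cases h : pvCheck nf m (pvAddK nk nf i j k arr) = true
    · simp [h]
    · have hb : pvCheck nf m (pvAddK nk nf i j k arr) = false := by
        cases hx : pvCheck nf m (pvAddK nk nf i j k arr)
        · rfl
        · exact absurd hx h
      rw [hc k] at *
      simp only [hb, if_neg h, Bool.false_or]
      exact ih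

theorem pvLoopIJ_spec (nk : List (List (List Int))) (nf m : Nat)
    (arr : List (List Int)) (ps : List (Nat × Nat))
    (hc : ∀ p ∈ ps, ∀ k, pvSubK nk nf p.1 p.2 k (pvAddK nk nf p.1 p.2 k arr) = arr) :
    pvLoopIJ nk nf m ps arr
      = ps.any (fun p => (List.range 4).any (fun k => pvCheck nf m (pvAddK nk nf p.1 p.2 k arr))) := by
  induction ps with
  | nil => rfl
  | cons p ps ih =>
    have hspec := pvLoopK_spec nk nf m p.1 p.2 arr (hc p (List.mem_cons_self ..)) (List.range 4)
    simp only [pvLoopIJ, List.any_cons]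
    rcases hres : pvLoopK nk nf m p.1 p.2 (List.range 4) arr with ⟨b, arr'⟩
    rw [hres] at hspec
    cases b
    · have hfalse : (List.range 4).any (fun k => pvCheck nf m (pvAddK nk nf p.1 p.2 k arr)) = false := by
        rw [← hspec.1]
      have harr : arr' = arr := by
        have := hspec.2 hfalse
        exact (Prod.mk.injEq _ _ _ _ ▸ this).2
      simp only [hfalse, Bool.false_or]
      rw [harr]
      exact ih (fun q hq => hc q (List.mem_cons_of_mem _ hq))
    · have : (List.range 4).any (fun k => pvCheck nf m (pvAddK nk nf p.1 p.2 k arr)) = true := by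
        rw [← hspec.1]
      simp [this]

theorem min?_of_mem_of_le (l : List Nat) (n : Nat) (hmem : n ∈ l) (hle : ∀ x ∈ l, n ≤ x) :
    l.min? = some n := by
  rw [List.min?_eq_some_iff]
  exact ⟨hmem, hle⟩

theorem zipStar_sq (rows : List (List Int)) (k : Nat)
    (h : (rows.map List.length).min? = some k) :
    SqG (pvZipStar rows) k rows.length := by
  unfold pvZipStar
  rw [h]
  refine ⟨by simp, fun i hi => ?_⟩
  rw [List.getD_eq_getElem _ _ (by simpa using hi)]
  simp

theorem SqG_rot (c : List (List Int)) (n : Nat) (hn : 1 ≤ n) (hs : SqG c n n) :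
    SqG (pvRot c) n n := by
  have hmin : ((c.reverse).map List.length).min? = some n := by
    apply min?_of_mem_of_le
    · have : c.reverse ≠ [] := by
        intro h
        have : c = [] := by simpa using congrArg List.reverse h
        rw [this] at hs
        simp [SqG] at hs
        omega
      obtain ⟨row, hrow⟩ := List.exists_mem_of_ne_nil _ this
      have hr : row ∈ c := List.mem_reverse.mp hrow
      obtain ⟨idx, hidx, heq⟩ := List.mem_iff_getElem.mp hr
      have := hs.2 idx (hs.1 ▸ hidx)
      rw [List.getD_eq_getElem _ _ hidx, heq] at this
      rw [← this]
      exact List.mem_map_of_mem hrow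
    · intro x hx
      obtain ⟨row, hrow, hlen⟩ := List.mem_map.mp hx
      have hr : row ∈ c := List.mem_reverse.mp hrow
      obtain ⟨idx, hidx, heq⟩ := List.mem_iff_getElem.mp hr
      have := hs.2 idx (hs.1 ▸ hidx)
      rw [List.getD_eq_getElem _ _ hidx, heq] at this
      omega
  have := zipStar_sq c.reverse n hmin
  rw [List.length_reverse, hs.1] at this
  exact this

-- shape of the 3-d new_key structure
def NkS (nk : List (List (List Int))) (n : Nat) : Prop :=
  nk.length = n ∧ ∀ i, i < n → (nk.getD i []).length = n

theorem getD_mapIdx_lt {α β : Type} (f : Nat → α → β) (l : List α) (i : Nat) (d : β)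
    (h : i < l.length) : (l.mapIdx f).getD i d = f i l[i] := by
  rw [List.getD_eq_getElem?_getD, List.getElem?_mapIdx, List.getElem?_eq_getElem h]
  rfl

theorem NkS_step (nk : List (List (List Int))) (n : Nat) (k' : List (List Int))
    (hs : NkS nk n) :
    NkS (nk.mapIdx (fun i row => row.mapIdx (fun j l => l ++ [pvGet2 k' i j]))) n := by
  refine ⟨by simpa using hs.1, fun i hi => ?_⟩
  have hi' : i < nk.length := hs.1 ▸ hi
  rw [getD_mapIdx_lt _ _ _ _ hi']
  have := hs.2 i hi
  rw [List.getD_eq_getElem _ _ hi'] at this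
  simpa using this

theorem nk_entry_step (nk : List (List (List Int))) (n : Nat) (k' : List (List Int))
    (hs : NkS nk n) (i j : Nat) (hi : i < n) (hj : j < n) :
    (((nk.mapIdx (fun i row => row.mapIdx (fun j l => l ++ [pvGet2 k' i j]))).getD i []).getD j [])
      = ((nk.getD i []).getD j []) ++ [pvGet2 k' i j] := by
  have hi' : i < nk.length := hs.1 ▸ hi
  have hlen := hs.2 i hi
  rw [List.getD_eq_getElem _ _ hi'] at hlen
  have hj' : j < nk[i].length := by omega
  rw [getD_mapIdx_lt _ _ _ _ hi', getD_mapIdx_lt _ _ _ _ hj']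
  rw [List.getD_eq_getElem _ _ hi', List.getD_eq_getElem _ _ hj']

theorem NkS_zero (n : Nat) : NkS (List.replicate n (List.replicate n ([] : List Int))) n := by
  refine ⟨List.length_replicate, fun i hi => ?_⟩
  rw [List.getD_eq_getElem _ _ (by simpa using hi)]
  simp

theorem all_congr_mem {α : Type} (l : List α) (f g : α → Bool)
    (h : ∀ x ∈ l, f x = g x) : l.all f = l.all g := by
  induction l with
  | nil => rfl
  | cons x l ih =>
    simp only [List.all_cons]
    rw [h x (List.mem_cons_self ..), ih (fun y hy => h y (List.mem_cons_of_mem _ hy))]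

-- the centred lock board: entries of the placement fold
theorem get2_base_region (lock : List (List Int)) (n m : Nat) (hn : 1 ≤ n)
    (r c : Nat) (hr : r < m) (hc : c < m) :
    pvGet2 ((pvPairs m m).foldl
        (fun b p => pvUpd2 (p.1 + (n - 1)) (p.2 + (n - 1)) (fun _ => pvGet2 lock p.1 p.2) b)
        (List.replicate (m + (n - 1) * 2) (List.replicate (m + (n - 1) * 2) (0 : Int))))
      (r + (n - 1)) (c + (n - 1)) = pvGet2 lock r c := by
  rw [get2_foldl_once (fun p => p.1 + (n - 1)) (fun p => p.2 + (n - 1)) _ _ _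
        (m + (n - 1) * 2) (m + (n - 1) * 2) _ _ (r, c)
        (by
          refine List.Nodup.map ?_ (nodup_pvPairs m m)
          intro p q hpq
          cases p; cases q
          simp only [Prod.mk.injEq] at hpq ⊢
          omega)
        ((mem_pvPairs m m (r, c)).mpr ⟨hr, hc⟩) rfl rfl
        (SqG_zeroGrid _) (by show r + (n - 1) < m + (n - 1) * 2; omega)
        (by show c + (n - 1) < m + (n - 1) * 2; omega)]

theorem SqG_base (lock : List (List Int)) (n m : Nat) :
    SqG ((pvPairs m m).foldl
        (fun b p => pvUpd2 (p.1 + (n - 1)) (p.2 + (n - 1)) (fun _ => pvGet2 lock p.1 p.2) b)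
        (List.replicate (m + (n - 1) * 2) (List.replicate (m + (n - 1) * 2) (0 : Int))))
      (m + (n - 1) * 2) (m + (n - 1) * 2) :=
  SqG_foldl_upd2 _ _ _ _ _ _ _ (SqG_zeroGrid _)

-- one check of A's board (insert at (i,j), test the lock region) equals one of B's direct fits tests
theorem check_eq_fits (nk : List (List (List Int))) (rotc lock : List (List Int))
    (n m i j k : Nat) (base : List (List Int)) (hn : 1 ≤ n)
    (hbase : SqG base (m + (n - 1) * 2) (m + (n - 1) * 2))
    (hbv : ∀ r c, r < m → c < m → pvGet2 base (r + (n - 1)) (c + (n - 1)) = pvGet2 lock r c)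
    (hg : ∀ ii jj, ii < n → jj < n → pvGet3 nk ii jj k = pvGet2 rotc ii jj)
    (hi : i < (n - 1) + m) (hj : j < (n - 1) + m) :
    pvCheck n m (pvAddK nk n i j k base) = pvFits rotc lock n m i j := by
  unfold pvCheck pvFits
  apply all_congr_mem
  intro r hrm
  rw [List.mem_range] at hrm
  apply all_congr_mem
  intro c hcm
  rw [List.mem_range] at hcm
  unfold pvAddK
  by_cases hw : i ≤ r + (n - 1) ∧ r + (n - 1) < i + n ∧ j ≤ c + (n - 1) ∧ c + (n - 1) < j + n
  · have hp₀ : (r + (n - 1) - i, c + (n - 1) - j) ∈ pvPairs n n := by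
      rw [mem_pvPairs]
      exact ⟨by omega, by omega⟩
    rw [get2_foldl_once (fun p => i + p.1) (fun p => j + p.2) _ _ _
          (m + (n - 1) * 2) (m + (n - 1) * 2) _ _ (r + (n - 1) - i, c + (n - 1) - j)
          (keymap_nodup n i j) hp₀ (by simp; omega) (by simp; omega)
          hbase (by omega) (by omega)]
    rw [hbv r c hrm hcm, if_pos hw]
    rw [hg _ _ (by simp; omega) (by simp; omega)]
  · rw [get2_foldl_none _ _ _ _ _ _ _ (by
      intro p hp hpc
      rw [mem_pvPairs] at hp
      apply hw
      omega)]
    rw [hbv r c hrm hcm, if_neg hw]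
    simp

theorem any_congr_mem {α : Type} (l : List α) (f g : α → Bool)
    (h : ∀ x ∈ l, f x = g x) : l.any f = l.any g := by
  induction l with
  | nil => rfl
  | cons x l ih =>
    simp only [List.any_cons]
    rw [h x (List.mem_cons_self ..), ih (fun y hy => h y (List.mem_cons_of_mem _ hy))]

theorem rotLoop_succ (lock : List (List Int)) (n m t : Nat) (cur : List (List Int)) :
    pvRotLoop lock n m (t + 1) cur
      = (((List.range ((n - 1) + m)).any (fun dx =>
            (List.range ((n - 1) + m)).any (fun dy => pvFits (pvRot cur) lock n m dx dy)))
          || pvRotLoop lock n m t (pvRot cur)) := by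
  simp only [pvRotLoop]
  cases h : (List.range ((n - 1) + m)).any (fun dx =>
      (List.range ((n - 1) + m)).any (fun dy => pvFits (pvRot cur) lock n m dx dy)) <;> simp [h]

theorem min?_reverse_of_min? (key : List (List Int)) (n : Nat)
    (h : (key.map List.length).min? = some n) :
    ((key.reverse).map List.length).min? = some n := by
  rw [List.min?_eq_some_iff] at h ⊢
  constructor
  · have := h.1
    simp only [List.mem_map] at this ⊢
    obtain ⟨row, hrow, hlen⟩ := this
    exact ⟨row, List.mem_reverse.mpr hrow, hlen⟩
  · intro b hb
    apply h.2
    simp only [List.mem_map] at hb ⊢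
    obtain ⟨row, hrow, hlen⟩ := hb
    exact ⟨row, List.mem_reverse.mp hrow, hlen⟩

theorem solution_equiv (key : List (List Int)) (lock : List (List Int))
    (hpre : Pre_solution key lock) : solution key lock = solution_alt key lock := by
  obtain ⟨hn, hmin, hlock⟩ := hpre
  set n := key.length with hn_def
  set m := lock.length with hm_def
  set c1 := pvRot key with hc1
  set c2 := pvRot c1 with hc2
  set c3 := pvRot c2 with hc3
  set c4 := pvRot c3 with hc4
  -- shapes of the four rotations
  have hs1 : SqG c1 n n := by
    have h := zipStar_sq key.reverse n (min?_reverse_of_min? key n hmin)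
    rw [List.length_reverse] at h
    exact h
  have hs2 : SqG c2 n n := SqG_rot _ _ hn hs1
  have hs3 : SqG c3 n n := SqG_rot _ _ hn hs2
  have hs4 : SqG c4 n n := SqG_rot _ _ hn hs3
  set nk0 := List.replicate n (List.replicate n ([] : List Int)) with hnk0
  set nk1 := nk0.mapIdx (fun i row => row.mapIdx (fun j l => l ++ [pvGet2 c1 i j])) with hnk1
  set nk2 := nk1.mapIdx (fun i row => row.mapIdx (fun j l => l ++ [pvGet2 c2 i j])) with hnk2
  set nk3 := nk2.mapIdx (fun i row => row.mapIdx (fun j l => l ++ [pvGet2 c3 i j])) with hnk3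
  set nk4 := nk3.mapIdx (fun i row => row.mapIdx (fun j l => l ++ [pvGet2 c4 i j])) with hnk4
  have hk0 : NkS nk0 n := NkS_zero n
  have hk1 : NkS nk1 n := NkS_step _ _ _ hk0
  have hk2 : NkS nk2 n := NkS_step _ _ _ hk1
  have hk3 : NkS nk3 n := NkS_step _ _ _ hk2
  have hb : pvBuildRots 4 key nk0 = (c4, nk4) := rfl
  simp only [solution, solution_alt]
  rw [hb]
  rw [← hn_def, ← hm_def]
  rw [hs4.1]
  set base := List.foldl
      (fun b p => pvUpd2 (p.1 + (n - 1)) (p.2 + (n - 1)) (fun x => pvGet2 lock p.1 p.2) b)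
      (List.replicate (m + (n - 1) * 2) (List.replicate (m + (n - 1) * 2) (0 : Int)))
      (pvPairs m m) with hbase_def
  have hSb : SqG base (m + (n - 1) * 2) (m + (n - 1) * 2) := SqG_base lock n m
  have hcancel : ∀ p ∈ pvPairs (n - 1 + m) (n - 1 + m), ∀ k,
      pvSubK nk4 n p.1 p.2 k (pvAddK nk4 n p.1 p.2 k base) = base := by
    intro p hp k
    apply sub_add_cancel_grid nk4 n p.1 p.2 k (m + (n - 1) * 2) base hSb
    intro q hq
    rw [mem_pvPairs] at hp hq
    omega
  rw [pvLoopIJ_spec nk4 n m base _ hcancel]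
  have e0 : ∀ i j, i < n → j < n → ((nk0.getD i []).getD j []) = ([] : List Int) := by
    intro i j hi hj
    rw [hnk0, List.getD_eq_getElem (List.replicate n (List.replicate n ([] : List Int))) []
          (by simpa using hi), List.getElem_replicate]
    rcases Nat.lt_or_ge j n with h | h
    · rw [List.getD_eq_getElem _ _ (by simpa using h), List.getElem_replicate]
    · rw [List.getD_eq_default _ _ (by simpa using h)]
  have hent : ∀ i j, i < n → j < n →
      ((nk4.getD i []).getD j []) = [pvGet2 c1 i j, pvGet2 c2 i j, pvGet2 c3 i j, pvGet2 c4 i j] := by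
    intro i j hi hj
    rw [hnk4, nk_entry_step _ n _ hk3 i j hi hj,
        hnk3, nk_entry_step _ n _ hk2 i j hi hj,
        hnk2, nk_entry_step _ n _ hk1 i j hi hj,
        hnk1, nk_entry_step _ n _ hk0 i j hi hj,
        e0 i j hi hj]
    rfl
  have hbv : ∀ r c, r < m → c < m →
      pvGet2 base (r + (n - 1)) (c + (n - 1)) = pvGet2 lock r c :=
    fun r c hr hc => get2_base_region lock n m hn r c hr hc
  have hfits : ∀ p ∈ pvPairs (n - 1 + m) (n - 1 + m),
      ((List.range 4).any fun k => pvCheck n m (pvAddK nk4 n p.1 p.2 k base))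
        = (pvFits c1 lock n m p.1 p.2 || (pvFits c2 lock n m p.1 p.2 ||
            (pvFits c3 lock n m p.1 p.2 || pvFits c4 lock n m p.1 p.2))) := by
    intro p hp
    rw [mem_pvPairs] at hp
    rw [show List.range 4 = [0, 1, 2, 3] from rfl]
    simp only [List.any_cons, List.any_nil, Bool.or_false]
    rw [check_eq_fits nk4 c1 lock n m p.1 p.2 0 base hn hSb hbv
          (fun ii jj h1 h2 => by unfold pvGet3; rw [hent ii jj h1 h2]; rfl) hp.1 hp.2,
        check_eq_fits nk4 c2 lock n m p.1 p.2 1 base hn hSb hbv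
          (fun ii jj h1 h2 => by unfold pvGet3; rw [hent ii jj h1 h2]; rfl) hp.1 hp.2,
        check_eq_fits nk4 c3 lock n m p.1 p.2 2 base hn hSb hbv
          (fun ii jj h1 h2 => by unfold pvGet3; rw [hent ii jj h1 h2]; rfl) hp.1 hp.2,
        check_eq_fits nk4 c4 lock n m p.1 p.2 3 base hn hSb hbv
          (fun ii jj h1 h2 => by unfold pvGet3; rw [hent ii jj h1 h2]; rfl) hp.1 hp.2]
  rw [any_congr_mem _ _ _ hfits]
  rw [rotLoop_succ, ← hc1, rotLoop_succ, ← hc2, rotLoop_succ, ← hc3, rotLoop_succ, ← hc4,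
      show pvRotLoop lock n m 0 c4 = false from rfl]
  rw [Bool.eq_iff_iff]
  simp only [List.any_eq_true, Bool.or_eq_true, mem_pvPairs, List.mem_range, Bool.or_false]
  constructor
  · rintro ⟨⟨dx, dy⟩, ⟨h1, h2⟩, hf⟩
    rcases hf with h | h | h | h
    · exact Or.inl ⟨dx, h1, dy, h2, h⟩
    · exact Or.inr (Or.inl ⟨dx, h1, dy, h2, h⟩)
    · exact Or.inr (Or.inr (Or.inl ⟨dx, h1, dy, h2, h⟩))
    · exact Or.inr (Or.inr (Or.inr ⟨dx, h1, dy, h2, h⟩))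
  · rintro (⟨dx, h1, dy, h2, h⟩ | ⟨dx, h1, dy, h2, h⟩ | ⟨dx, h1, dy, h2, h⟩ | ⟨dx, h1, dy, h2, h⟩)
    · exact ⟨(dx, dy), ⟨h1, h2⟩, Or.inl h⟩
    · exact ⟨(dx, dy), ⟨h1, h2⟩, Or.inr (Or.inl h)⟩
    · exact ⟨(dx, dy), ⟨h1, h2⟩, Or.inr (Or.inr (Or.inl h))⟩
    · exact ⟨(dx, dy), ⟨h1, h2⟩, Or.inr (Or.inr (Or.inr h))⟩


-- ===== VERDICT (by name: the statement is the Claim_ definition above) =====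
theorem solution_spec : Claim_equal_solution := by
  intro key lock _hdom hpre
  show solution key lock = solution_alt key lock
  exact solution_equiv key lock hpre
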